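-- pv_equiv track=rewrite | github.com/Ji-Hwan-Jung/coding-test | level1/예산.py | soultion
-- ===== SOURCE A (Python) =====
-- def soultion(d, budget):
--     answer = 0
--
--     for i in sorted(d):
--         if budget<i:
--             break
--         budget -= i
--         answer += 1
--
--     return answer
-- ===== SOURCE B (Python) =====
-- def soultion(d, budget):
--     prefix = []
--     s = 0
--     for x in sorted(d):
--         s += x
--         prefix.append(s)
--     k = 0
--     while k < len(prefix) and prefix[k] <= budget:
--         k += 1
--     return k
-- ===== Notes on version B (the rewrite author's own statement) =====
-- stated objective: alternative
-- what changed: Replaces the budget-mutating greedy break loop with building the sorted prefix-sum table in one pass and then counting its longest prefix that stays <= budget.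
import Mathlib
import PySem

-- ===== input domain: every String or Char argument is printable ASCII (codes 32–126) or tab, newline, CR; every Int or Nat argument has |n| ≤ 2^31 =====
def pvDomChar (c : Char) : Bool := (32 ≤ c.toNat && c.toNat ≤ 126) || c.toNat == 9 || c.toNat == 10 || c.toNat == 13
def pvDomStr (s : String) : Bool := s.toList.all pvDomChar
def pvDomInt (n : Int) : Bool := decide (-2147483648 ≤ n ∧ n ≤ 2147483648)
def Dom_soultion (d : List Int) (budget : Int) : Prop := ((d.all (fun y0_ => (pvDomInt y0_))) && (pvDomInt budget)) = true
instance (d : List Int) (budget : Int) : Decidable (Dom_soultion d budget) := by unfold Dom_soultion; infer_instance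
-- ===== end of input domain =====

-- B builds the sorted prefix-sum table then counts its longest prefix ≤ budget; same cost, different decomposition.

-- ===== PORT A =====
-- the greedy for-loop with break: state (budget, answer)
def soultionLoop : List Int → Int → Int → Int
  | [], _, answer => answer
  | i :: rest, budget, answer =>
      if budget < i then answer
      else soultionLoop rest (budget - i) (answer + 1)

def soultion (d : List Int) (budget : Int) : Int :=
  soultionLoop (PySem.List.sorted d (fun x => x)) budget 0

-- ===== PORT B =====
-- the for-loop building prefix sums (accumulator s)
def altPrefix : List Int → Int → List Int
  | [], _ => []
  | x :: rest, s => (s + x) :: altPrefix rest (s + x)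

-- the while-loop counting leading entries ≤ budget
def altCount : List Int → Int → Int
  | [], _ => 0
  | p :: rest, budget => if p ≤ budget then 1 + altCount rest budget else 0

def soultion_alt (d : List Int) (budget : Int) : Int :=
  altCount (altPrefix (PySem.List.sorted d (fun x => x)) 0) budget

-- ===== PRECONDITION & SPEC =====
def Spec_soultion (d : List Int) (budget : Int) (out : Int) : Prop := out = soultion_alt d budget
instance (d : List Int) (budget : Int) (out : Int) : Decidable (Spec_soultion d budget out) := by unfold Spec_soultion; infer_instance

-- ===== CLAIM (what is proved, stated in full; the proofs are below) =====
def Claim_equal_soultion : Prop := ∀ (d : List Int) (budget : Int), Dom_soultion d budget → Spec_soultion d budget (soultion d budget)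

-- ===== LEMMAS AND PROOFS =====
theorem soultionLoop_eq (l : List Int) : ∀ (s b a : Int),
    soultionLoop l b a = a + altCount (altPrefix l s) (s + b) := by
  induction l with
  | nil => intro s b a; simp [soultionLoop, altPrefix, altCount]
  | cons x rest ih =>
    intro s b a
    simp only [soultionLoop, altPrefix, altCount]
    by_cases h : b < x
    · rw [if_pos h, if_neg (by omega)]
      ring
    · rw [if_neg h, if_pos (by omega)]
      rw [ih (s + x) (b - x) (a + 1)]
      ring_nf

-- ===== VERDICT (by name: the statement is the Claim_ definition above) =====
theorem soultion_spec : Claim_equal_soultion := by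
  intro d budget _
  unfold Spec_soultion soultion soultion_alt
  rw [soultionLoop_eq (PySem.List.sorted d (fun x => x)) 0 budget 0]
  simp
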